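-- pv_equiv track=rewrite | github.com/youngyangyang/praxys | scripts/translate_missing.py | _extract_obsolete_blocks
-- ===== SOURCE A (Python) =====
-- def _obsolete_block_ranges(lines: list[str]) -> list[tuple[int, int]]:
--     """Return (start, end_exclusive) ranges for each obsolete entry block.
--
--     A block is one or more contiguous `#~` lines plus the `#:` / `#.` / `#,`
--     comment lines Lingui emits directly above them (which reference the
--     now-obsolete msgid, not the following active entry). Blank lines are
--     boundaries and never part of a block.
--     """
--     ranges: list[tuple[int, int]] = []
--     n = len(lines)
--     i = 0
--     while i < n:
--         if lines[i].lstrip().startswith("#~"):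
--             # Walk back to collect refs/comments belonging to this obsolete
--             # entry, stopping at a blank line or any non-`#` content.
--             start = i
--             j = i - 1
--             while j >= 0:
--                 s = lines[j].lstrip()
--                 if s == "" or not s.startswith("#"):
--                     break
--                 start = j
--                 j -= 1
--             # Walk forward across contiguous `#~` lines.
--             end = i
--             while end < n and lines[end].lstrip().startswith("#~"):
--                 end += 1
--             ranges.append((start, end))
--             i = end
--         else:
--             i += 1
--     return ranges
--
-- def _extract_obsolete_blocks(
--     entries: list[dict], trailing: list[str]
-- ) -> list[str]:
--     """Collect every obsolete-entry block (`#:` / `#.` refs + `#~` lines)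
--     from both inline prefixes and the trailing buffer. Used to preserve the
--     target catalog's obsolete content — source-side blocks are irrelevant.
--     Blocks are separated by a single blank line in the output.
--     """
--     out: list[str] = []
--
--     def _append(lines: list[str]) -> None:
--         for start, end in _obsolete_block_ranges(lines):
--             if out:
--                 out.append("")
--             out.extend(lines[start:end])
--
--     for e in entries:
--         _append(e["prefix_lines"])
--     _append(trailing)
--     return out
-- ===== SOURCE B (Python) =====
-- def _extract_obsolete_blocks(entries, trailing):
--     """Collect obsolete-entry blocks, separated by single blank lines.
--
--     Different decomposition: partition each line list into maximal runs of
--     consecutive '#'-comment lines, then scan each run left-to-right for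
--     contiguous '#~' subgroups, emitting lines[run_start:subgroup_end] for
--     each subgroup (always anchored at the run start). No backward walking.
--     """
--     out = []
--
--     def _blocks(lines):
--         blocks = []
--         n = len(lines)
--         i = 0
--         while i < n:
--             if not lines[i].lstrip().startswith("#"):
--                 i += 1
--                 continue
--             run_start = i
--             j = i
--             while j < n and lines[j].lstrip().startswith("#"):
--                 j += 1
--             k = run_start
--             while k < j:
--                 if lines[k].lstrip().startswith("#~"):
--                     e = k
--                     while e < j and lines[e].lstrip().startswith("#~"):
--                         e += 1
--                     blocks.append(lines[run_start:e])
--                     k = e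
--                 else:
--                     k += 1
--             i = j
--         return blocks
--
--     def _emit(lines):
--         for blk in _blocks(lines):
--             if out:
--                 out.append("")
--             out.extend(blk)
--
--     for e in entries:
--         _emit(e["prefix_lines"])
--     _emit(trailing)
--     return out
-- ===== Notes on version B (the rewrite author's own statement) =====
-- stated objective: alternative
-- what changed: A walks backward from each '#~' group to find its anchor; B instead partitions the lines into maximal runs of consecutive '#'-comment lines and scans each run left-to-right, emitting every contiguous '#~' subgroup anchored at the run start, with no backward scanning.
-- outside the precondition, e.g. on _extract_obsolete_blocks([{}], []): A raises KeyError, B raises KeyError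
import Mathlib
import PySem

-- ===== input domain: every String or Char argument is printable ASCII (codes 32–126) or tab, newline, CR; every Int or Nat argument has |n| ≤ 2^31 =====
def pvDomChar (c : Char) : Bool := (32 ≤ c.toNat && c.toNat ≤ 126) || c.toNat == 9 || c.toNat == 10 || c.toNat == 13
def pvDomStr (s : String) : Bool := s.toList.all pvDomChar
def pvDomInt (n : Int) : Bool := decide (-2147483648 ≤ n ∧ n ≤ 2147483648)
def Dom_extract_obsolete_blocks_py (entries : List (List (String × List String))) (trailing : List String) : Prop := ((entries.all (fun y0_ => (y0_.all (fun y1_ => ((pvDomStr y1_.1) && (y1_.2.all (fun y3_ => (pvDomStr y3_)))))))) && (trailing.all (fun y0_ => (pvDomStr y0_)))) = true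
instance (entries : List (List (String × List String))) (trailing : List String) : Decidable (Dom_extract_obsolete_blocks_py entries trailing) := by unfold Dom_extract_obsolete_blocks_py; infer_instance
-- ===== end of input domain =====

-- B replaces A's per-`#~`-group backward walk by a segment-then-process pass:
-- partition into maximal '#'-comment runs, then scan each run left-to-right
-- (objective: alternative decomposition, same asymptotic cost).
-- All while loops are ported with an exact fuel bound (a pure totality guard).

-- ===== PORT A =====
-- lines[i].lstrip().startswith("#~")  (index always in range where used)
def aIsTilde (lines : List String) (i : Nat) : Bool :=
  PySem.Str.startswith (PySem.Str.lstrip (lines.getD i "")) "#~"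

-- the backward while loop: j = start-1; while j >= 0: s = lines[j].lstrip();
-- if s == "" or not s.startswith("#"): break; start = j; j -= 1
def aWalkBack (lines : List String) : Nat → Nat
  | 0 => 0
  | j+1 =>
    let s := PySem.Str.lstrip (lines.getD j "")
    if s == "" || !(PySem.Str.startswith s "#") then j+1 else aWalkBack lines j

-- while end < n and lines[end].lstrip().startswith("#~"): end += 1
def aWalkFwdF (lines : List String) : Nat → Nat → Nat
  | 0, e => e
  | f+1, e => if e < lines.length ∧ aIsTilde lines e = true then aWalkFwdF lines f (e+1) else e

def aWalkFwd (lines : List String) (e : Nat) : Nat := aWalkFwdF lines (lines.length - e) e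

-- A's main while loop over i
def aRangesF (lines : List String) : Nat → Nat → List (Nat × Nat)
  | 0, _ => []
  | f+1, i =>
    if i < lines.length then
      if aIsTilde lines i = true then
        (aWalkBack lines i, aWalkFwd lines i) :: aRangesF lines f (aWalkFwd lines i)
      else aRangesF lines f (i+1)
    else []

def aRanges (lines : List String) (i : Nat) : List (Nat × Nat) :=
  aRangesF lines (lines.length - i) i

-- the nested _append: for (start, end) in ranges: if out: out.append(""); out.extend(lines[start:end])
def aAppend (out : List String) (lines : List String) : List String :=
  (aRanges lines 0).foldl
    (fun o r => (if o.isEmpty then o else o ++ [""]) ++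
      PySem.List.slice lines (some (r.1 : Int)) (some (r.2 : Int))) out

-- e["prefix_lines"] : first-match association-list lookup
def aLookup : List (String × List String) → Option (List String)
  | [] => none
  | (k, v) :: rest => if k == "prefix_lines" then some v else aLookup rest

def extract_obsolete_blocks_py (entries : List (List (String × List String))) (trailing : List String) : List String :=
  aAppend (entries.foldl (fun o e => aAppend o ((aLookup e).getD [])) []) trailing

-- ===== PORT B =====
def bHash (lines : List String) (i : Nat) : Bool :=
  PySem.Str.startswith (PySem.Str.lstrip (lines.getD i "")) "#"

def bTilde (lines : List String) (i : Nat) : Bool :=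
  PySem.Str.startswith (PySem.Str.lstrip (lines.getD i "")) "#~"

-- while j < n and lines[j].lstrip().startswith("#"): j += 1
def bRunEndF (lines : List String) : Nat → Nat → Nat
  | 0, j => j
  | f+1, j => if j < lines.length ∧ bHash lines j = true then bRunEndF lines f (j+1) else j

def bRunEnd (lines : List String) (j : Nat) : Nat := bRunEndF lines (lines.length - j) j

-- while e < j and lines[e].lstrip().startswith("#~"): e += 1
def bTildeEndF (lines : List String) (j : Nat) : Nat → Nat → Nat
  | 0, e => e
  | f+1, e => if e < j ∧ bTilde lines e = true then bTildeEndF lines j f (e+1) else e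

def bTildeEnd (lines : List String) (j : Nat) (e : Nat) : Nat := bTildeEndF lines j (j - e) e

-- inner scan of one run [a, j): contiguous '#~' subgroups, each anchored at a
def bInnerF (lines : List String) (a : Nat) (j : Nat) : Nat → Nat → List (List String)
  | 0, _ => []
  | f+1, k =>
    if k < j then
      if bTilde lines k = true then
        PySem.List.slice lines (some (a : Int)) (some ((bTildeEnd lines j k : Nat) : Int))
          :: bInnerF lines a j f (bTildeEnd lines j k)
      else bInnerF lines a j f (k+1)
    else []

def bInner (lines : List String) (a : Nat) (j : Nat) (k : Nat) : List (List String) :=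
  bInnerF lines a j (j - k) k

-- outer loop: find each maximal '#'-run, process it, jump past it
def bBlocksF (lines : List String) : Nat → Nat → List (List String)
  | 0, _ => []
  | f+1, i =>
    if i < lines.length then
      if bHash lines i = true then
        bInner lines i (bRunEnd lines i) i ++ bBlocksF lines f (bRunEnd lines i)
      else bBlocksF lines f (i+1)
    else []

def bBlocks (lines : List String) (i : Nat) : List (List String) :=
  bBlocksF lines (lines.length - i) i

def bEmit (out : List String) (lines : List String) : List String :=
  (bBlocks lines 0).foldl (fun o blk => (if o.isEmpty then o else o ++ [""]) ++ blk) out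

def extract_obsolete_blocks_py_alt (entries : List (List (String × List String))) (trailing : List String) : List String :=
  bEmit (entries.foldl (fun o e => bEmit o ((List.lookup "prefix_lines" e).getD [])) []) trailing

-- ===== PRECONDITION & SPEC =====
-- Pre_ excludes exactly the inputs where some entry dict lacks the key
-- "prefix_lines": there Python A raises KeyError (returns no value).
def Pre_extract_obsolete_blocks_py (entries : List (List (String × List String))) (trailing : List String) : Prop :=
  (entries.all (fun e => e.any (fun kv => kv.1 == "prefix_lines"))) = true
instance (entries : List (List (String × List String))) (trailing : List String) : Decidable (Pre_extract_obsolete_blocks_py entries trailing) := by unfold Pre_extract_obsolete_blocks_py; infer_instance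

def pvWitness_extract_obsolete_blocks_py : (List (List (String × List String))) × List String :=
  ([[("prefix_lines", ["#: ref", "#~ msgid \"x\""])]], ["#~ y"])

def Spec_extract_obsolete_blocks_py (entries : List (List (String × List String))) (trailing : List String) (out : List String) : Prop := out = extract_obsolete_blocks_py_alt entries trailing
instance (entries : List (List (String × List String))) (trailing : List String) (out : List String) : Decidable (Spec_extract_obsolete_blocks_py entries trailing out) := by unfold Spec_extract_obsolete_blocks_py; infer_instance

-- ===== CLAIM (what is proved, stated in full; the proofs are below) =====
def Claim_equal_extract_obsolete_blocks_py : Prop := ∀ (entries : List (List (String × List String))) (trailing : List String), Dom_extract_obsolete_blocks_py entries trailing → Pre_extract_obsolete_blocks_py entries trailing → Spec_extract_obsolete_blocks_py entries trailing (extract_obsolete_blocks_py entries trailing)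

-- ===== LEMMAS AND PROOFS =====

-- aIsTilde and bTilde are the same predicate
theorem aIsTilde_eq (lines : List String) (i : Nat) : aIsTilde lines i = bTilde lines i := rfl

theorem tilde_hash (lines : List String) (i : Nat)
    (h : bTilde lines i = true) : bHash lines i = true := by
  simp only [bTilde, bHash, PySem.Str.startswith_eq, PySem.Chars.startswith_iff] at h ⊢
  exact List.IsPrefix.trans (by decide) h

-- A's backward-break test `s == "" or not s.startswith("#")` is just ¬(starts with '#')
theorem condEq (s : String) :
    ((s == "" || !(PySem.Str.startswith s "#"))) = !(PySem.Str.startswith s "#") := by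
  cases hs : s == "" with
  | false => simp
  | true =>
    have : s = "" := eq_of_beq hs
    subst this; decide

-- unfolding equations restoring the while-loop shape of the fueled ports

theorem aWalkFwd_eq (lines : List String) (e : Nat) :
    aWalkFwd lines e =
      if e < lines.length ∧ aIsTilde lines e = true then aWalkFwd lines (e+1) else e := by
  by_cases h : e < lines.length ∧ aIsTilde lines e = true
  · rw [if_pos h]
    unfold aWalkFwd
    have h2 : lines.length - e = (lines.length - (e+1)) + 1 := by omega
    rw [h2, aWalkFwdF, if_pos h]
  · rw [if_neg h]
    unfold aWalkFwd
    cases hf : lines.length - e with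
    | zero => rfl
    | succ f => rw [aWalkFwdF, if_neg h]

theorem bRunEnd_eq (lines : List String) (j : Nat) :
    bRunEnd lines j =
      if j < lines.length ∧ bHash lines j = true then bRunEnd lines (j+1) else j := by
  by_cases h : j < lines.length ∧ bHash lines j = true
  · rw [if_pos h]
    unfold bRunEnd
    have h2 : lines.length - j = (lines.length - (j+1)) + 1 := by omega
    rw [h2, bRunEndF, if_pos h]
  · rw [if_neg h]
    unfold bRunEnd
    cases hf : lines.length - j with
    | zero => rfl
    | succ f => rw [bRunEndF, if_neg h]

theorem bTildeEnd_eq (lines : List String) (j e : Nat) :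
    bTildeEnd lines j e =
      if e < j ∧ bTilde lines e = true then bTildeEnd lines j (e+1) else e := by
  by_cases h : e < j ∧ bTilde lines e = true
  · rw [if_pos h]
    unfold bTildeEnd
    have h2 : j - e = (j - (e+1)) + 1 := by omega
    rw [h2, bTildeEndF, if_pos h]
  · rw [if_neg h]
    unfold bTildeEnd
    cases hf : j - e with
    | zero => rfl
    | succ f => rw [bTildeEndF, if_neg h]

theorem aWalkFwd_ge (lines : List String) (e : Nat) : e ≤ aWalkFwd lines e := by
  have H : ∀ f e, e ≤ aWalkFwdF lines f e := by
    intro f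
    induction f with
    | zero => intro e; exact le_refl e
    | succ f ih =>
      intro e
      rw [aWalkFwdF]
      split
      · exact Nat.le_trans (Nat.le_succ e) (ih (e+1))
      · exact le_refl e
  exact H _ e

theorem aWalkFwd_lt (lines : List String) (i : Nat)
    (h : i < lines.length) (ht : aIsTilde lines i = true) : i < aWalkFwd lines i := by
  rw [aWalkFwd_eq, if_pos ⟨h, ht⟩]
  have := aWalkFwd_ge lines (i+1)
  omega

theorem bTildeEnd_ge (lines : List String) (j e : Nat) : e ≤ bTildeEnd lines j e := by
  have H : ∀ f e, e ≤ bTildeEndF lines j f e := by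
    intro f
    induction f with
    | zero => intro e; exact le_refl e
    | succ f ih =>
      intro e
      rw [bTildeEndF]
      split
      · exact Nat.le_trans (Nat.le_succ e) (ih (e+1))
      · exact le_refl e
  exact H _ e

theorem bTildeEnd_lt (lines : List String) (j k : Nat)
    (h : k < j) (ht : bTilde lines k = true) : k < bTildeEnd lines j k := by
  rw [bTildeEnd_eq, if_pos ⟨h, ht⟩]
  have := bTildeEnd_ge lines j (k+1)
  omega

theorem bRunEnd_ge (lines : List String) (j : Nat) : j ≤ bRunEnd lines j := by
  have H : ∀ f j, j ≤ bRunEndF lines f j := by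
    intro f
    induction f with
    | zero => intro j; exact le_refl j
    | succ f ih =>
      intro j
      rw [bRunEndF]
      split
      · exact Nat.le_trans (Nat.le_succ j) (ih (j+1))
      · exact le_refl j
  exact H _ j

theorem bRunEnd_lt (lines : List String) (i : Nat)
    (h : i < lines.length) (hh : bHash lines i = true) : i < bRunEnd lines i := by
  rw [bRunEnd_eq, if_pos ⟨h, hh⟩]
  have := bRunEnd_ge lines (i+1)
  omega

-- fuel irrelevance for the jumping loops
theorem aRangesF_mono (lines : List String) :
    ∀ f1 f2 i, lines.length - i ≤ f1 → f1 ≤ f2 → aRangesF lines f1 i = aRangesF lines f2 i := by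
  intro f1
  induction f1 with
  | zero =>
    intro f2 i h1 h2
    cases f2 with
    | zero => rfl
    | succ f => rw [aRangesF, aRangesF, if_neg (by omega)]
  | succ f ih =>
    intro f2 i h1 h2
    cases f2 with
    | zero => exact absurd h2 (by omega)
    | succ g =>
      rw [aRangesF, aRangesF]
      by_cases hin : i < lines.length
      · rw [if_pos hin, if_pos hin]
        by_cases ht : aIsTilde lines i = true
        · rw [if_pos ht, if_pos ht]
          have hfw : i < aWalkFwd lines i := aWalkFwd_lt lines i hin ht
          congr 1
          exact ih g (aWalkFwd lines i) (by omega) (by omega)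
        · rw [if_neg ht, if_neg ht]
          exact ih g (i+1) (by omega) (by omega)
      · rw [if_neg hin, if_neg hin]

theorem aRanges_eq (lines : List String) (i : Nat) :
    aRanges lines i =
      if i < lines.length then
        (if aIsTilde lines i = true then
          (aWalkBack lines i, aWalkFwd lines i) :: aRanges lines (aWalkFwd lines i)
        else aRanges lines (i+1))
      else [] := by
  by_cases hin : i < lines.length
  · rw [if_pos hin]
    unfold aRanges
    have h2 : lines.length - i = (lines.length - i - 1) + 1 := by omega
    rw [h2, aRangesF, if_pos hin]
    by_cases ht : aIsTilde lines i = true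
    · rw [if_pos ht, if_pos ht]
      have hfw : i < aWalkFwd lines i := aWalkFwd_lt lines i hin ht
      congr 1
      exact (aRangesF_mono lines (lines.length - aWalkFwd lines i) (lines.length - i - 1)
        (aWalkFwd lines i) (le_refl _) (by omega)).symm
    · rw [if_neg ht, if_neg ht]
      have h3 : lines.length - i - 1 = lines.length - (i+1) := by omega
      rw [h3]
  · rw [if_neg hin]
    unfold aRanges
    rw [Nat.sub_eq_zero_of_le (by omega)]
    rfl

theorem bInnerF_mono (lines : List String) (a j : Nat) :
    ∀ f1 f2 k, j - k ≤ f1 → f1 ≤ f2 → bInnerF lines a j f1 k = bInnerF lines a j f2 k := by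
  intro f1
  induction f1 with
  | zero =>
    intro f2 k h1 h2
    cases f2 with
    | zero => rfl
    | succ f => rw [bInnerF, bInnerF, if_neg (by omega)]
  | succ f ih =>
    intro f2 k h1 h2
    cases f2 with
    | zero => exact absurd h2 (by omega)
    | succ g =>
      rw [bInnerF, bInnerF]
      by_cases hk : k < j
      · rw [if_pos hk, if_pos hk]
        by_cases ht : bTilde lines k = true
        · rw [if_pos ht, if_pos ht]
          have hte : k < bTildeEnd lines j k := bTildeEnd_lt lines j k hk ht
          congr 1
          exact ih g (bTildeEnd lines j k) (by omega) (by omega)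
        · rw [if_neg ht, if_neg ht]
          exact ih g (k+1) (by omega) (by omega)
      · rw [if_neg hk, if_neg hk]

theorem bInner_eq (lines : List String) (a j k : Nat) :
    bInner lines a j k =
      if k < j then
        (if bTilde lines k = true then
          PySem.List.slice lines (some (a : Int)) (some ((bTildeEnd lines j k : Nat) : Int))
            :: bInner lines a j (bTildeEnd lines j k)
        else bInner lines a j (k+1))
      else [] := by
  by_cases hk : k < j
  · rw [if_pos hk]
    unfold bInner
    have h2 : j - k = (j - k - 1) + 1 := by omega
    rw [h2, bInnerF, if_pos hk]
    by_cases ht : bTilde lines k = true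
    · rw [if_pos ht, if_pos ht]
      have hte : k < bTildeEnd lines j k := bTildeEnd_lt lines j k hk ht
      congr 1
      exact (bInnerF_mono lines a j (j - bTildeEnd lines j k) (j - k - 1)
        (bTildeEnd lines j k) (le_refl _) (by omega)).symm
    · rw [if_neg ht, if_neg ht]
      have h3 : j - k - 1 = j - (k+1) := by omega
      rw [h3]
  · rw [if_neg hk]
    unfold bInner
    rw [Nat.sub_eq_zero_of_le (by omega)]
    rfl

theorem bBlocksF_mono (lines : List String) :
    ∀ f1 f2 i, lines.length - i ≤ f1 → f1 ≤ f2 → bBlocksF lines f1 i = bBlocksF lines f2 i := by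
  intro f1
  induction f1 with
  | zero =>
    intro f2 i h1 h2
    cases f2 with
    | zero => rfl
    | succ f => rw [bBlocksF, bBlocksF, if_neg (by omega)]
  | succ f ih =>
    intro f2 i h1 h2
    cases f2 with
    | zero => exact absurd h2 (by omega)
    | succ g =>
      rw [bBlocksF, bBlocksF]
      by_cases hin : i < lines.length
      · rw [if_pos hin, if_pos hin]
        by_cases hh : bHash lines i = true
        · rw [if_pos hh, if_pos hh]
          have hre : i < bRunEnd lines i := bRunEnd_lt lines i hin hh
          congr 1
          exact ih g (bRunEnd lines i) (by omega) (by omega)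
        · rw [if_neg hh, if_neg hh]
          exact ih g (i+1) (by omega) (by omega)
      · rw [if_neg hin, if_neg hin]

theorem bBlocks_eq (lines : List String) (i : Nat) :
    bBlocks lines i =
      if i < lines.length then
        (if bHash lines i = true then
          bInner lines i (bRunEnd lines i) i ++ bBlocks lines (bRunEnd lines i)
        else bBlocks lines (i+1))
      else [] := by
  by_cases hin : i < lines.length
  · rw [if_pos hin]
    unfold bBlocks
    have h2 : lines.length - i = (lines.length - i - 1) + 1 := by omega
    rw [h2, bBlocksF, if_pos hin]
    by_cases hh : bHash lines i = true
    · rw [if_pos hh, if_pos hh]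
      have hre : i < bRunEnd lines i := bRunEnd_lt lines i hin hh
      congr 1
      exact (bBlocksF_mono lines (lines.length - bRunEnd lines i) (lines.length - i - 1)
        (bRunEnd lines i) (le_refl _) (by omega)).symm
    · rw [if_neg hh, if_neg hh]
      have h3 : lines.length - i - 1 = lines.length - (i+1) := by omega
      rw [h3]
  · rw [if_neg hin]
    unfold bBlocks
    rw [Nat.sub_eq_zero_of_le (by omega)]
    rfl

theorem bRunEnd_stop (lines : List String) (j : Nat)
    (h : ¬(j < lines.length ∧ bHash lines j = true)) : bRunEnd lines j = j := by
  rw [bRunEnd_eq, if_neg h]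

theorem bRunEnd_le (lines : List String) (a : Nat) (ha : a ≤ lines.length) :
    bRunEnd lines a ≤ lines.length := by
  have H : ∀ d a, lines.length - a ≤ d → a ≤ lines.length → bRunEnd lines a ≤ lines.length := by
    intro d
    induction d with
    | zero =>
      intro a hd ha
      rw [bRunEnd_eq]
      split
      · next h => exact absurd h.1 (by omega)
      · exact ha
    | succ d ih =>
      intro a hd ha
      rw [bRunEnd_eq]
      split
      · next h => exact ih (a+1) (by omega) (by omega)
      · exact ha
  exact H _ a (le_refl _) ha

-- the stopping line of a run is the end of the list or a non-'#' line
theorem bRunEnd_spec (lines : List String) (a : Nat) :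
    lines.length ≤ bRunEnd lines a ∨ bHash lines (bRunEnd lines a) = false := by
  have H : ∀ d a, lines.length - a ≤ d →
      lines.length ≤ bRunEnd lines a ∨ bHash lines (bRunEnd lines a) = false := by
    intro d
    induction d with
    | zero =>
      intro a hd
      rw [bRunEnd_eq]
      split
      · next h => exact absurd h.1 (by omega)
      · next h =>
        by_cases hh : bHash lines a = true
        · left; rcases not_and_or.mp h with h' | h'
          · omega
          · exact absurd hh h'
        · right; simpa using hh
    | succ d ih =>
      intro a hd
      rw [bRunEnd_eq]
      split
      · next h => exact ih (a+1) (by omega)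
      · next h =>
        by_cases hh : bHash lines a = true
        · left; rcases not_and_or.mp h with h' | h'
          · omega
          · exact absurd hh h'
        · right; simpa using hh
  exact H _ a (le_refl _)

-- bRunEnd is constant across '#' lines
theorem bRunEnd_from (lines : List String) (i a : Nat) (hai : a ≤ i) (hil : i ≤ lines.length)
    (hH : ∀ m, a ≤ m → m < i → bHash lines m = true) : bRunEnd lines a = bRunEnd lines i := by
  have H : ∀ d a, i - a ≤ d → a ≤ i → (∀ m, a ≤ m → m < i → bHash lines m = true) →
      bRunEnd lines a = bRunEnd lines i := by
    intro d
    induction d with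
    | zero =>
      intro a hd ha _
      have : a = i := by omega
      subst this; rfl
    | succ d ih =>
      intro a hd ha hH
      by_cases hai2 : a = i
      · subst hai2; rfl
      · have h1 : a < i := by omega
        have h2 : bHash lines a = true := hH a (le_refl _) h1
        rw [bRunEnd_eq, if_pos ⟨by omega, h2⟩]
        exact ih (a+1) (by omega) (by omega) (fun m h1 h2 => hH m (by omega) h2)
  exact H _ a (le_refl _) hai hH

-- A's backward walk lands exactly on the start of the enclosing '#'-run
theorem aWalkBack_eq (lines : List String) (i a : Nat) (hai : a ≤ i)
    (hH : ∀ m, a ≤ m → m < i → bHash lines m = true)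
    (hstart : a = 0 ∨ bHash lines (a-1) = false) : aWalkBack lines i = a := by
  induction i with
  | zero =>
    have : a = 0 := by omega
    subst this; rfl
  | succ j ih =>
    show (let s := PySem.Str.lstrip (lines.getD j "");
      if s == "" || !(PySem.Str.startswith s "#") then j+1 else aWalkBack lines j) = a
    simp only [condEq]
    by_cases haj : a = j + 1
    · have hf : bHash lines j = false := by
        rcases hstart with h0 | hf
        · omega
        · simpa [haj] using hf
      simp only [bHash] at hf
      simp only [hf, Bool.not_false, if_true]
      omega
    · have h2 : bHash lines j = true := hH j (by omega) (by omega)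
      simp only [bHash] at h2
      simp only [h2, Bool.not_true, Bool.false_eq_true, if_false]
      exact ih (by omega) (fun m hm1 hm2 => hH m hm1 (by omega))

-- inside a run, A's forward '#~' walk agrees with B's bounded one
theorem fwd_eq_tildeEnd (lines : List String) (j : Nat) (hj : j ≤ lines.length)
    (hstop : lines.length ≤ j ∨ bHash lines j = false) :
    ∀ e, e ≤ j → aWalkFwd lines e = bTildeEnd lines j e := by
  have H : ∀ d e, j - e ≤ d → e ≤ j → aWalkFwd lines e = bTildeEnd lines j e := by
    intro d
    induction d with
    | zero =>
      intro e hd he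
      have hej : e = j := by omega
      subst hej
      rw [bTildeEnd_eq, if_neg (by omega)]
      rw [aWalkFwd_eq, if_neg]
      rintro ⟨h1, h2⟩
      rcases hstop with h | h
      · omega
      · rw [aIsTilde_eq] at h2
        exact absurd (tilde_hash lines e h2) (by simp [h])
    | succ d ih =>
      intro e hd he
      by_cases hej : e = j
      · subst hej
        rw [bTildeEnd_eq, if_neg (by omega)]
        rw [aWalkFwd_eq, if_neg]
        rintro ⟨h1, h2⟩
        rcases hstop with h | h
        · omega
        · rw [aIsTilde_eq] at h2
          exact absurd (tilde_hash lines e h2) (by simp [h])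
      · by_cases ht : bTilde lines e = true
        · rw [bTildeEnd_eq, if_pos ⟨by omega, ht⟩]
          rw [aWalkFwd_eq, if_pos ⟨by omega, by rw [aIsTilde_eq]; exact ht⟩]
          exact ih (e+1) (by omega) (by omega)
        · rw [bTildeEnd_eq, if_neg (by simp [ht])]
          rw [aWalkFwd_eq, if_neg (by rw [aIsTilde_eq]; simp [ht])]
  exact fun e => H _ e (le_refl _)

theorem aWalkFwd_le (lines : List String) (e : Nat) (he : e ≤ lines.length) :
    aWalkFwd lines e ≤ lines.length := by
  have H : ∀ d e, lines.length - e ≤ d → e ≤ lines.length → aWalkFwd lines e ≤ lines.length := by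
    intro d
    induction d with
    | zero =>
      intro e hd he
      rw [aWalkFwd_eq]
      split
      · next h => exact absurd h.1 (by omega)
      · exact he
    | succ d ih =>
      intro e hd he
      rw [aWalkFwd_eq]
      split
      · next h => exact ih (e+1) (by omega) (by omega)
      · exact he
  exact H _ e (le_refl _) he

-- every line the forward walk crosses is a '#~' line
theorem aWalkFwd_tilde (lines : List String) (e : Nat) :
    ∀ m, e ≤ m → m < aWalkFwd lines e → bTilde lines m = true := by
  have H : ∀ d e, lines.length - e ≤ d →
      ∀ m, e ≤ m → m < aWalkFwd lines e → bTilde lines m = true := by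
    intro d
    induction d with
    | zero =>
      intro e hd m h1 h2
      rw [aWalkFwd_eq] at h2
      split at h2
      · next h => exact absurd h.1 (by omega)
      · omega
    | succ d ih =>
      intro e hd m h1 h2
      rw [aWalkFwd_eq] at h2
      split at h2
      · next h =>
        by_cases hme : m = e
        · subst hme; rw [aIsTilde_eq] at h; exact h.2
        · exact ih (e+1) (by omega) m (by omega) h2
      · omega
  exact H _ e (le_refl _)

-- B's outer step, folded back together
theorem blocks_unfold (lines : List String) (a : Nat) :
    bInner lines a (bRunEnd lines a) a ++ bBlocks lines (bRunEnd lines a) = bBlocks lines a := by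
  by_cases ha : a < lines.length
  · by_cases hh : bHash lines a = true
    · conv_rhs => rw [bBlocks_eq]
      rw [if_pos ha, if_pos hh]
    · have hr := bRunEnd_stop lines a (by simp [hh])
      rw [hr]
      conv_lhs => rw [bInner_eq]
      rw [if_neg (by omega : ¬ a < a), List.nil_append]
  · have hr := bRunEnd_stop lines a (by omega)
    rw [hr]
    conv_lhs => rw [bInner_eq]
    rw [if_neg (by omega : ¬ a < a), List.nil_append]

-- the central invariant: A's loop at i inside the run starting at a produces
-- exactly B's remaining inner blocks of that run followed by B's later blocks
theorem key_lemma (lines : List String) :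
    ∀ d i a, lines.length - i ≤ d → a ≤ i → i ≤ lines.length →
    (∀ m, a ≤ m → m < i → bHash lines m = true) →
    (a = 0 ∨ bHash lines (a-1) = false) →
    (aRanges lines i).map
        (fun r => PySem.List.slice lines (some (r.1 : Int)) (some (r.2 : Int)))
      = bInner lines a (bRunEnd lines a) i ++ bBlocks lines (bRunEnd lines a) := by
  intro d
  induction d with
  | zero =>
    intro i a hd hai hil hH hstart
    have hin : i = lines.length := by omega
    subst hin
    have hre : bRunEnd lines a = lines.length := by
      rw [bRunEnd_from lines lines.length a hai (le_refl _) hH]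
      exact bRunEnd_stop lines _ (by omega)
    rw [aRanges_eq, if_neg (by omega), hre]
    rw [bInner_eq, if_neg (by omega)]
    rw [bBlocks_eq, if_neg (by omega)]
    rfl
  | succ d ih =>
    intro i a hd hai hil hH hstart
    by_cases hin : i < lines.length
    · have hre := bRunEnd_from lines i a hai (by omega) hH
      by_cases hh : bHash lines i = true
      · have hij : i < bRunEnd lines a := by
          rw [hre]; exact bRunEnd_lt lines i hin hh
        have hjle : bRunEnd lines a ≤ lines.length := by
          rw [hre]; exact bRunEnd_le lines i (by omega)
        have hjstop : lines.length ≤ bRunEnd lines a ∨ bHash lines (bRunEnd lines a) = false := by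
          rw [hre]; exact bRunEnd_spec lines i
        by_cases ht : bTilde lines i = true
        · have hfw : aWalkFwd lines i = bTildeEnd lines (bRunEnd lines a) i :=
            fwd_eq_tildeEnd lines _ hjle hjstop i (by omega)
          have hback : aWalkBack lines i = a := aWalkBack_eq lines i a hai hH hstart
          have hfi : i < aWalkFwd lines i := aWalkFwd_lt lines i hin (by rw [aIsTilde_eq]; exact ht)
          have hfle : aWalkFwd lines i ≤ lines.length := aWalkFwd_le lines i (by omega)
          rw [aRanges_eq, if_pos hin, if_pos (by rw [aIsTilde_eq]; exact ht)]
          rw [bInner_eq, if_pos hij, if_pos ht]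
          rw [List.map_cons, hback, hfw]
          congr 1
          rw [← hfw]
          exact ih (aWalkFwd lines i) a (by omega) (by omega) hfle
            (fun m h1 h2 => by
              by_cases hmi : m < i
              · exact hH m h1 hmi
              · exact tilde_hash lines m (aWalkFwd_tilde lines i m (by omega) h2))
            hstart
        · rw [aRanges_eq, if_pos hin, if_neg (by rw [aIsTilde_eq]; simp [ht])]
          rw [bInner_eq, if_pos hij, if_neg (by simp [ht])]
          exact ih (i+1) a (by omega) (by omega) (by omega)
            (fun m h1 h2 => by
              by_cases hmi : m < i
              · exact hH m h1 hmi
              · have : m = i := by omega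
                subst this; exact hh)
            hstart
      · have hre2 : bRunEnd lines a = i := by
          rw [hre]; exact bRunEnd_stop lines i (by simp [hh])
        have hnt : ¬ aIsTilde lines i = true := by
          rw [aIsTilde_eq]
          intro ht; exact hh (tilde_hash lines i ht)
        rw [aRanges_eq, if_pos hin, if_neg hnt, hre2]
        rw [bInner_eq, if_neg (by omega)]
        rw [bBlocks_eq, if_pos hin, if_neg (by simp [hh])]
        have := ih (i+1) (i+1) (by omega) (le_refl _) (by omega)
          (by omega) (Or.inr (by simpa using hh))
        rw [this]
        exact blocks_unfold lines (i+1)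
    · have hin' : i = lines.length := by omega
      subst hin'
      have hre : bRunEnd lines a = lines.length := by
        rw [bRunEnd_from lines lines.length a hai (le_refl _) hH]
        exact bRunEnd_stop lines _ (by omega)
      rw [aRanges_eq, if_neg (by omega), hre]
      rw [bInner_eq, if_neg (by omega)]
      rw [bBlocks_eq, if_neg (by omega)]
      rfl

theorem ranges_eq_blocks (lines : List String) :
    (aRanges lines 0).map
        (fun r => PySem.List.slice lines (some (r.1 : Int)) (some (r.2 : Int)))
      = bBlocks lines 0 := by
  rw [key_lemma lines lines.length 0 0 (by omega) (le_refl _) (by omega)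
      (by omega) (Or.inl rfl)]
  exact blocks_unfold lines 0

theorem append_eq_emit (out lines : List String) : aAppend out lines = bEmit out lines := by
  rw [aAppend, bEmit, ← ranges_eq_blocks, List.foldl_map]

theorem lookup_eq (e : List (String × List String)) :
    aLookup e = List.lookup "prefix_lines" e := by
  induction e with
  | nil => rfl
  | cons kv rest ih =>
    obtain ⟨k, v⟩ := kv
    by_cases hk : k = "prefix_lines"
    · subst hk; simp [aLookup, List.lookup]
    · have h1 : (k == "prefix_lines") = false := by simp [hk]
      have h2 : ("prefix_lines" == k) = false := by simp [Ne.symm hk]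
      simp [aLookup, List.lookup, h1, h2, ih]

theorem fold_eq (es : List (List (String × List String))) (o : List String) :
    es.foldl (fun o e => aAppend o ((aLookup e).getD [])) o
      = es.foldl (fun o e => bEmit o ((List.lookup "prefix_lines" e).getD [])) o := by
  induction es generalizing o with
  | nil => rfl
  | cons e rest ih =>
    simp only [List.foldl_cons]
    rw [append_eq_emit, lookup_eq, ih]

-- ===== VERDICT (by name: the statement is the Claim_ definition above) =====
theorem extract_obsolete_blocks_py_spec : Claim_equal_extract_obsolete_blocks_py := by
  intro entries trailing _ _
  unfold Spec_extract_obsolete_blocks_py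
  rw [extract_obsolete_blocks_py, extract_obsolete_blocks_py_alt, append_eq_emit, fold_eq]
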